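-- pv_equiv track=rewrite | github.com/yebinchon/xstack-benchmark | polybench-lilac/LLMTransformation/transformations/magic_number_extraction.py | _split_code_segments
-- ===== SOURCE A (Python) =====
-- from typing import Dict, List, Any, Tuple, Set, Optional
--
-- def _split_code_segments(code: str) -> List[Tuple[bool, str]]:
--     """Split code into segments that are code vs non-code (comments/strings)."""
--     segments = []
--     i = 0
--     n = len(code)
--     last = 0
--     in_block = False
--     in_line = False
--     in_str = False
--     in_char = False
--
--     while i < n:
--         ch = code[i]
--         nxt = code[i+1] if i + 1 < n else ''
--
--         if in_block:
--             if ch == '*' and nxt == '/':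
--                 i += 2
--                 segments.append((False, code[last:i]))
--                 last = i
--                 in_block = False
--                 continue
--             i += 1
--             continue
--         if in_line:
--             if ch == '\n':
--                 i += 1
--                 segments.append((False, code[last:i]))
--                 last = i
--                 in_line = False
--                 continue
--             i += 1
--             continue
--         if in_str:
--             if ch == '\\':
--                 i += 2
--                 continue
--             if ch == '"':
--                 i += 1
--                 segments.append((False, code[last:i]))
--                 last = i
--                 in_str = False
--                 continue
--             i += 1
--             continue
--         if in_char:
--             if ch == '\\':
--                 i += 2
--                 continue
--             if ch == "'":
--                 i += 1
--                 segments.append((False, code[last:i]))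
--                 last = i
--                 in_char = False
--                 continue
--             i += 1
--             continue
--
--         # Not in any special context; check for openings
--         if ch == '/' and nxt == '*':
--             if i > last:
--                 segments.append((True, code[last:i]))
--             in_block = True
--             last = i
--             i += 2
--             continue
--         if ch == '/' and nxt == '/':
--             if i > last:
--                 segments.append((True, code[last:i]))
--             in_line = True
--             last = i
--             i += 2
--             continue
--         if ch == '"':
--             if i > last:
--                 segments.append((True, code[last:i]))
--             in_str = True
--             last = i
--             i += 1
--             continue
--         if ch == "'":
--             if i > last:
--                 segments.append((True, code[last:i]))
--             in_char = True
--             last = i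
--             i += 1
--             continue
--         i += 1
--
--     # Flush remainder
--     if last < n:
--         if in_block or in_line or in_str or in_char:
--             segments.append((False, code[last:]))
--         else:
--             segments.append((True, code[last:]))
--
--     return segments
-- ===== SOURCE B (Python) =====
-- from typing import List, Tuple
--
--
-- def _token_end(code: str, start: int) -> int:
--     """End index (exclusive) of the comment/string/char token starting at `start`."""
--     n = len(code)
--     if code.startswith('/*', start):
--         j = code.find('*/', start + 2)
--         return n if j == -1 else j + 2
--     if code.startswith('//', start):
--         j = code.find('\n', start + 2)
--         return n if j == -1 else j + 1
--     q = code[start]  # '"' or "'"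
--     j = start + 1
--     while j < n:
--         c = code.find(q, j)
--         if c == -1:
--             return n
--         b = code.find('\\', j)
--         if b != -1 and b < c:
--             j = b + 2          # skip the escaped character
--         else:
--             return c + 1
--     return n
--
--
-- def _split_code_segments(code: str) -> List[Tuple[bool, str]]:
--     """Split code into segments that are code vs non-code (comments/strings)."""
--     out = []
--     n = len(code)
--     pos = 0
--     while pos < n:
--         starts = [j for j in (code.find('/*', pos), code.find('//', pos),
--                               code.find('"', pos), code.find("'", pos)) if j != -1]
--         if not starts:
--             out.append((True, code[pos:]))
--             return out
--         start = min(starts)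
--         if start > pos:
--             out.append((True, code[pos:start]))
--         end = _token_end(code, start)
--         out.append((False, code[start:end]))
--         pos = end
--     return out
-- ===== Notes on version B (the rewrite author's own statement) =====
-- stated objective: faster
-- what changed: A's per-character while-loop with four in-context boolean flags is replaced by a tokenizer that jumps with str.find: the next token opening is the minimum of four find results, and each token's end is located by a single find of its closing delimiter (with a find-based escape-skipping scan for quoted literals), so Python iterates per token/escape instead of per character.
import Mathlib
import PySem

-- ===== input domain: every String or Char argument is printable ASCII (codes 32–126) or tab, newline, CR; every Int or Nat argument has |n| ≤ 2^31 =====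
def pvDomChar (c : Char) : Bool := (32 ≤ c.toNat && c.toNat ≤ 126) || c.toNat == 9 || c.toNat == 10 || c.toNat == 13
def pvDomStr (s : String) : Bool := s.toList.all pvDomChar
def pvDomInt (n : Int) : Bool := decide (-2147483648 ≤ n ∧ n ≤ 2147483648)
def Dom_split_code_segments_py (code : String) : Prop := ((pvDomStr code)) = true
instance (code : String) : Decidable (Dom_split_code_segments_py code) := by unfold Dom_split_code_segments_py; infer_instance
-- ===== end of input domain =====

-- B replaces A's per-character four-flag state machine by str.find-based jumps to the
-- next token opening / closing delimiter (objective: faster, constant-factor).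

-- code[a:b] for natural bounds a ≤ b (exact: Python slice on these arguments)
def pseg (cs : List Char) (a b : Nat) : String :=
  String.ofList (PySem.List.slice cs (some (a : Int)) (some (b : Int)))

-- ===== PORT A =====
-- the while-loop of A: state = (segments, i, last, in_block, in_line, in_str, in_char).
-- fuel only makes the recursion structural: i grows by ≥ 1 per iteration, so fuel = len(code)
-- (passed by the wrapper) is never exhausted before the loop's own exit i ≥ len(code).
def aLoop (cs : List Char) : Nat → List (Bool × String) → Nat → Nat →
    Bool → Bool → Bool → Bool → List (Bool × String)
  | fuel+1, segs, i, last, bk, ln, st, ch =>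
    if i < cs.length then
      if bk then
        if cs[i]? = some '*' ∧ cs[i+1]? = some '/' then
          aLoop cs fuel (segs ++ [(false, pseg cs last (i+2))]) (i+2) (i+2) false ln st ch
        else aLoop cs fuel segs (i+1) last bk ln st ch
      else if ln then
        if cs[i]? = some '\n' then
          aLoop cs fuel (segs ++ [(false, pseg cs last (i+1))]) (i+1) (i+1) bk false st ch
        else aLoop cs fuel segs (i+1) last bk ln st ch
      else if st then
        if cs[i]? = some '\\' then aLoop cs fuel segs (i+2) last bk ln st ch
        else if cs[i]? = some '"' then
          aLoop cs fuel (segs ++ [(false, pseg cs last (i+1))]) (i+1) (i+1) bk ln false ch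
        else aLoop cs fuel segs (i+1) last bk ln st ch
      else if ch then
        if cs[i]? = some '\\' then aLoop cs fuel segs (i+2) last bk ln st ch
        else if cs[i]? = some '\'' then
          aLoop cs fuel (segs ++ [(false, pseg cs last (i+1))]) (i+1) (i+1) bk ln st false
        else aLoop cs fuel segs (i+1) last bk ln st ch
      else
        if cs[i]? = some '/' ∧ cs[i+1]? = some '*' then
          aLoop cs fuel (segs ++ if last < i then [(true, pseg cs last i)] else []) (i+2) i true ln st ch
        else if cs[i]? = some '/' ∧ cs[i+1]? = some '/' then
          aLoop cs fuel (segs ++ if last < i then [(true, pseg cs last i)] else []) (i+2) i bk true st ch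
        else if cs[i]? = some '"' then
          aLoop cs fuel (segs ++ if last < i then [(true, pseg cs last i)] else []) (i+1) i bk ln true ch
        else if cs[i]? = some '\'' then
          aLoop cs fuel (segs ++ if last < i then [(true, pseg cs last i)] else []) (i+1) i bk ln st true
        else aLoop cs fuel segs (i+1) last bk ln st ch
    else
      segs ++ if last < cs.length then
        [((!(bk || ln || st || ch)), String.ofList (PySem.List.slice cs (some (last : Int)) none))]
      else []
  | 0, segs, _, last, bk, ln, st, ch =>
    segs ++ if last < cs.length then
      [((!(bk || ln || st || ch)), String.ofList (PySem.List.slice cs (some (last : Int)) none))]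
    else []

def split_code_segments_py (code : String) : List (Bool × String) :=
  aLoop code.toList code.toList.length [] 0 0 false false false false

-- ===== PORT B =====
-- the inner while-loop of _token_end for a string/char literal opened by q (j = current scan
-- start). fuel = len(code) (passed by the caller) is never exhausted: j grows by ≥ 2 per pass.
def strEnd (cs : List Char) (q : Char) : Nat → Nat → Nat
  | fuel+1, j =>
    if j < cs.length then
      if PySem.Chars.findFrom cs [q] (j : Int) none = -1 then cs.length
      else if PySem.Chars.findFrom cs ['\\'] (j : Int) none ≠ -1 ∧
          PySem.Chars.findFrom cs ['\\'] (j : Int) none < PySem.Chars.findFrom cs [q] (j : Int) none then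
        strEnd cs q fuel ((PySem.Chars.findFrom cs ['\\'] (j : Int) none).toNat + 2)
      else (PySem.Chars.findFrom cs [q] (j : Int) none).toNat + 1
    else cs.length
  | 0, _ => cs.length

-- _token_end; code.startswith(p, start) ported as the two-character condition (exact)
def tokenEnd (cs : List Char) (start : Nat) : Nat :=
  if cs[start]? = some '/' ∧ cs[start+1]? = some '*' then
    if PySem.Chars.findFrom cs ['*','/'] ((start+2 : Nat) : Int) none = -1 then cs.length
    else (PySem.Chars.findFrom cs ['*','/'] ((start+2 : Nat) : Int) none).toNat + 2
  else if cs[start]? = some '/' ∧ cs[start+1]? = some '/' then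
    if PySem.Chars.findFrom cs ['\n'] ((start+2 : Nat) : Int) none = -1 then cs.length
    else (PySem.Chars.findFrom cs ['\n'] ((start+2 : Nat) : Int) none).toNat + 1
  else strEnd cs (cs.getD start ' ') cs.length (start + 1)

-- [j for j in (find,find,find,find) if j != -1]; results are ≥ pos ≥ 0 so Int.toNat is exact
def bStarts (cs : List Char) (pos : Nat) : List Nat :=
  (([PySem.Chars.findFrom cs ['/','*'] (pos : Int) none,
     PySem.Chars.findFrom cs ['/','/'] (pos : Int) none,
     PySem.Chars.findFrom cs ['"'] (pos : Int) none,
     PySem.Chars.findFrom cs ['\''] (pos : Int) none].filter (fun j => j != -1)).map Int.toNat)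

-- the main while-loop of B; fuel = len(code) (passed by the wrapper) is never exhausted
-- since pos strictly increases with every emitted token.
def bLoop (cs : List Char) : Nat → Nat → List (Bool × String)
  | fuel+1, pos =>
    if pos < cs.length then
      match (bStarts cs pos).min? with
      | none => [(true, String.ofList (PySem.List.slice cs (some (pos : Int)) none))]
      | some start =>
        (if pos < start then [(true, pseg cs pos start)] else [])
          ++ (false, pseg cs start (tokenEnd cs start)) :: bLoop cs fuel (tokenEnd cs start)
    else []
  | 0, _ => []

def split_code_segments_py_alt (code : String) : List (Bool × String) :=
  bLoop code.toList code.toList.length 0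

-- ===== PRECONDITION & SPEC =====
def Spec_split_code_segments_py (code : String) (out : List (Bool × String)) : Prop := out = split_code_segments_py_alt code
instance (code : String) (out : List (Bool × String)) : Decidable (Spec_split_code_segments_py code out) := by unfold Spec_split_code_segments_py; infer_instance

-- ===== CLAIM (what is proved, stated in full; the proofs are below) =====
def Claim_equal_split_code_segments_py : Prop := ∀ (code : String), Dom_split_code_segments_py code → Spec_split_code_segments_py code (split_code_segments_py code)

-- ===== LEMMAS AND PROOFS =====

-- positions where A (in neutral state) opens a non-code token
def TokAt (cs : List Char) (j : Nat) : Prop :=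
  (cs[j]? = some '/' ∧ cs[j+1]? = some '*') ∨ (cs[j]? = some '/' ∧ cs[j+1]? = some '/')
    ∨ cs[j]? = some '"' ∨ cs[j]? = some '\''

lemma aLoop_over (cs : List Char) (fuel : Nat) (segs : List (Bool × String)) (i last : Nat)
    (bk ln st ch : Bool) (h : cs.length ≤ i) :
    aLoop cs fuel segs i last bk ln st ch
      = segs ++ if last < cs.length then
          [((!(bk || ln || st || ch)), String.ofList (PySem.List.slice cs (some (last : Int)) none))]
        else [] := by
  cases fuel with
  | zero => rfl
  | succ f => rw [aLoop, if_neg (by omega)]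

lemma strEnd_over (cs : List Char) (q : Char) (fuel j : Nat) (h : cs.length ≤ j) :
    strEnd cs q fuel j = cs.length := by
  cases fuel with
  | zero => rfl
  | succ f => rw [strEnd, if_neg (by omega)]

lemma strEnd_fuel (cs : List Char) (q : Char) :
    ∀ f f' j, cs.length - j ≤ f → cs.length - j ≤ f' →
      strEnd cs q f j = strEnd cs q f' j := by
  intro f
  induction f with
  | zero =>
    intro f' j h h'
    rw [strEnd_over cs q 0 j (by omega), strEnd_over cs q f' j (by omega)]
  | succ f ih =>
    intro f' j h h'
    by_cases hin : j < cs.length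
    · cases f' with
      | zero => omega
      | succ f'' =>
        rw [strEnd, strEnd, if_pos hin, if_pos hin]
        by_cases hc : PySem.Chars.findFrom cs [q] (j : Int) none = -1
        · rw [if_pos hc, if_pos hc]
        · rw [if_neg hc, if_neg hc]
          by_cases hb : PySem.Chars.findFrom cs ['\\'] (j : Int) none ≠ -1 ∧
              PySem.Chars.findFrom cs ['\\'] (j : Int) none < PySem.Chars.findFrom cs [q] (j : Int) none
          · rw [if_pos hb, if_pos hb]
            have hbs := (PySem.Chars.findFrom_natCast_spec cs ['\\'] j (by omega) hb.1).1
            exact ih f'' _ (by omega) (by omega)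
          · rw [if_neg hb, if_neg hb]
    · rw [strEnd_over cs q _ j (by omega), strEnd_over cs q _ j (by omega)]

lemma strEnd_unfoldN (cs : List Char) (q : Char) (j : Nat) (hin : j < cs.length) :
    strEnd cs q cs.length j =
      if PySem.Chars.findFrom cs [q] (j : Int) none = -1 then cs.length
      else if PySem.Chars.findFrom cs ['\\'] (j : Int) none ≠ -1 ∧
          PySem.Chars.findFrom cs ['\\'] (j : Int) none < PySem.Chars.findFrom cs [q] (j : Int) none then
        strEnd cs q cs.length ((PySem.Chars.findFrom cs ['\\'] (j : Int) none).toNat + 2)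
      else (PySem.Chars.findFrom cs [q] (j : Int) none).toNat + 1 := by
  obtain ⟨f, hf⟩ : ∃ f, cs.length = f + 1 := ⟨cs.length - 1, by omega⟩
  have hrw : ∀ x, strEnd cs q f (x+2) = strEnd cs q cs.length (x+2) :=
    fun x => strEnd_fuel cs q f cs.length (x+2) (by omega) (by omega)
  conv_lhs => rw [hf]
  rw [strEnd, if_pos hin, hrw]

-- strEnd never moves left
lemma strEnd_ge (cs : List Char) (q : Char) :
    ∀ fuel j, j ≤ cs.length → j ≤ strEnd cs q fuel j := by
  intro fuel
  induction fuel with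
  | zero => intro j hj; exact hj
  | succ f ih =>
    intro j hj
    by_cases hin : j < cs.length
    · rw [strEnd, if_pos hin]
      by_cases hc : PySem.Chars.findFrom cs [q] (j : Int) none = -1
      · rw [if_pos hc]; omega
      · rw [if_neg hc]
        by_cases hb : PySem.Chars.findFrom cs ['\\'] (j : Int) none ≠ -1 ∧
            PySem.Chars.findFrom cs ['\\'] (j : Int) none < PySem.Chars.findFrom cs [q] (j : Int) none
        · rw [if_pos hb]
          have hs := (PySem.Chars.findFrom_natCast_spec cs ['\\'] j (by omega) hb.1).1
          by_cases h2 : (PySem.Chars.findFrom cs ['\\'] (j : Int) none).toNat + 2 ≤ cs.length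
          · have := ih ((PySem.Chars.findFrom cs ['\\'] (j : Int) none).toNat + 2) h2
            omega
          · rw [strEnd_over cs q f _ (by omega)]; omega
        · rw [if_neg hb]
          have hs := (PySem.Chars.findFrom_natCast_spec cs [q] j (by omega) hc).1
          omega
    · rw [strEnd_over cs q _ j (by omega)]; omega

lemma tokenEnd_gt (cs : List Char) (start : Nat) (h : start < cs.length) :
    start < tokenEnd cs start := by
  unfold tokenEnd
  split_ifs with h1 h2 h3 h4
  · omega
  · have hl : start + 1 < cs.length := by
      have := h1.2; rcases List.getElem?_eq_some_iff.1 this with ⟨hlt, _⟩; omega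
    have := (PySem.Chars.findFrom_natCast_spec cs ['*','/'] (start+2) (by omega) h2).1
    omega
  · omega
  · have hl : start + 1 < cs.length := by
      have := h3.2; rcases List.getElem?_eq_some_iff.1 this with ⟨hlt, _⟩; omega
    have := (PySem.Chars.findFrom_natCast_spec cs ['\n'] (start+2) (by omega) h4).1
    omega
  · have := strEnd_ge cs (cs.getD start ' ') cs.length (start+1) (by omega)
    omega

lemma bStarts_bound (cs : List Char) (pos : Nat) (hp : pos ≤ cs.length) :
    ∀ x ∈ bStarts cs pos, pos ≤ x ∧ x < cs.length := by
  intro x hx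
  simp only [bStarts, List.mem_map, List.mem_filter] at hx
  rcases hx with ⟨f, ⟨hf, hne⟩, rfl⟩
  have hne' : f ≠ -1 := by simpa using hne
  simp only [List.mem_cons, List.not_mem_nil, or_false] at hf
  rcases hf with rfl | rfl | rfl | rfl
  all_goals {
    first
    | (have hs := PySem.Chars.findFrom_natCast_spec cs ['/','*'] pos hp hne'
       have hlen := hs.2.1.length_le)
    | (have hs := PySem.Chars.findFrom_natCast_spec cs ['/','/'] pos hp hne'
       have hlen := hs.2.1.length_le)
    | (have hs := PySem.Chars.findFrom_natCast_spec cs ['"'] pos hp hne'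
       have hlen := hs.2.1.length_le)
    | (have hs := PySem.Chars.findFrom_natCast_spec cs ['\''] pos hp hne'
       have hlen := hs.2.1.length_le)
    have h1 := hs.1
    simp only [List.length_drop, List.length_cons, List.length_nil] at hlen
    constructor <;> omega }

lemma bLoop_over (cs : List Char) (fuel p : Nat) (h : cs.length ≤ p) : bLoop cs fuel p = [] := by
  cases fuel with
  | zero => rfl
  | succ f => rw [bLoop, if_neg (by omega)]

lemma bLoop_fuel (cs : List Char) :
    ∀ f f' p, cs.length - p ≤ f → cs.length - p ≤ f' → bLoop cs f p = bLoop cs f' p := by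
  intro f
  induction f with
  | zero =>
    intro f' p h h'
    rw [bLoop_over cs 0 p (by omega), bLoop_over cs f' p (by omega)]
  | succ f ih =>
    intro f' p h h'
    by_cases hin : p < cs.length
    · cases f' with
      | zero => omega
      | succ f'' =>
        rw [bLoop, bLoop, if_pos hin, if_pos hin]
        cases hmm : (bStarts cs p).min? with
        | none => rfl
        | some start =>
          have hbd := bStarts_bound cs p (by omega) start (List.min?_mem hmm)
          have hgt := tokenEnd_gt cs start hbd.2
          dsimp only
          rw [ih f'' (tokenEnd cs start) (by omega) (by omega)]
    · rw [bLoop_over cs _ p (by omega), bLoop_over cs _ p (by omega)]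

lemma bLoop_none_eq (cs : List Char) (p : Nat) (h : p < cs.length)
    (hm : (bStarts cs p).min? = none) :
    bLoop cs cs.length p = [(true, String.ofList (PySem.List.slice cs (some (p : Int)) none))] := by
  obtain ⟨f, hf⟩ : ∃ f, cs.length = f + 1 := ⟨cs.length - 1, by omega⟩
  conv_lhs => rw [hf]
  rw [bLoop, if_pos h, hm]

lemma bLoop_some_eq (cs : List Char) (p i : Nat) (h : p < cs.length)
    (hm : (bStarts cs p).min? = some i) :
    bLoop cs cs.length p = (if p < i then [(true, pseg cs p i)] else [])
      ++ (false, pseg cs i (tokenEnd cs i)) :: bLoop cs cs.length (tokenEnd cs i) := by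
  obtain ⟨f, hf⟩ : ∃ f, cs.length = f + 1 := ⟨cs.length - 1, by omega⟩
  have hbd := bStarts_bound cs p (by omega) i (List.min?_mem hm)
  have hgt := tokenEnd_gt cs i hbd.2
  have hrw : bLoop cs f (tokenEnd cs i) = bLoop cs cs.length (tokenEnd cs i) :=
    bLoop_fuel cs f cs.length (tokenEnd cs i) (by omega) (by omega)
  conv_lhs => rw [hf]
  rw [bLoop, if_pos h, hm]
  dsimp only
  rw [hrw]

lemma pref_at_one (cs : List Char) (a : Char) (m : Nat) :
    [a] <+: cs.drop m ↔ cs[m]? = some a := by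
  cases h : cs.drop m with
  | nil =>
    have : cs.length ≤ m := by
      by_contra hc
      have := congrArg List.length h
      simp at this; omega
    simp [List.getElem?_eq_none this]
  | cons b t =>
    have h0 : cs[m]? = some b := by
      have := congrArg (fun l => l[0]?) h
      simpa [List.getElem?_drop] using this
    simp [List.cons_prefix_cons, h0, eq_comm]

lemma pref_at_two (cs : List Char) (a b : Char) (m : Nat) :
    [a, b] <+: cs.drop m ↔ cs[m]? = some a ∧ cs[m+1]? = some b := by
  constructor
  · rintro ⟨t, ht⟩
    have h0 := congrArg (fun l => l[0]?) ht
    have h1 := congrArg (fun l => l[1]?) ht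
    simp [List.getElem?_drop] at h0 h1
    exact ⟨h0.symm, h1.symm⟩
  · rintro ⟨h0, h1⟩
    have hm : m < cs.length := (List.getElem?_eq_some_iff.1 h0).1
    have hm1 : m + 1 < cs.length := (List.getElem?_eq_some_iff.1 h1).1
    refine ⟨cs.drop (m+2), ?_⟩
    have e1 : cs.drop m = cs[m] :: cs.drop (m+1) := List.drop_eq_getElem_cons hm
    have e2 : cs.drop (m+1) = cs[m+1] :: cs.drop (m+2) := List.drop_eq_getElem_cons hm1
    rw [e1, e2]
    have ha : cs[m] = a := by rw [List.getElem?_eq_getElem hm] at h0; exact Option.some.inj h0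
    have hb : cs[m+1] = b := by rw [List.getElem?_eq_getElem hm1] at h1; exact Option.some.inj h1
    simp [ha, hb]

lemma infix_drop_iff (cs sub : List Char) (k : Nat) :
    sub <:+: cs.drop k ↔ ∃ m, k ≤ m ∧ sub <+: cs.drop m := by
  constructor
  · intro h
    rcases List.infix_iff_prefix_suffix.1 h with ⟨t, hp, hsuf⟩
    rcases hsuf with ⟨u, hu⟩
    refine ⟨k + u.length, by omega, ?_⟩
    have h1 : (cs.drop k).drop u.length = t := by rw [← hu]; simp
    have h2 : cs.drop (k + u.length) = t := by rw [← h1, List.drop_drop]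
    rw [h2]; exact hp
  · rintro ⟨m, hkm, hp⟩
    refine List.infix_iff_prefix_suffix.2 ⟨cs.drop m, hp, ?_⟩
    have h2 : cs.drop m = (cs.drop k).drop (m - k) := by rw [List.drop_drop]; congr 1; omega
    rw [h2]; exact List.drop_suffix _ _

lemma ffNone' (cs sub : List Char) (k : Nat) (hk : k ≤ cs.length)
    (h : ∀ m, k ≤ m → ¬ sub <+: cs.drop m) :
    PySem.Chars.findFrom cs sub (k : Int) none = -1 := by
  rw [PySem.Chars.findFrom_natCast_eq_neg_one_iff cs sub k hk, infix_drop_iff]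
  rintro ⟨m, hm, hp⟩
  exact h m hm hp

lemma ffEq' (cs sub : List Char) (k i : Nat) (hk : k ≤ cs.length) (hki : k ≤ i)
    (hP : sub <+: cs.drop i) (hmin : ∀ j, k ≤ j → j < i → ¬ sub <+: cs.drop j) :
    PySem.Chars.findFrom cs sub (k : Int) none = (i : Int) := by
  have hne : PySem.Chars.findFrom cs sub (k : Int) none ≠ -1 := by
    intro he
    rw [PySem.Chars.findFrom_natCast_eq_neg_one_iff cs sub k hk, infix_drop_iff] at he
    exact he ⟨i, hki, hP⟩
  have hs := PySem.Chars.findFrom_natCast_spec cs sub k hk hne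
  have h0 : (0:Int) ≤ PySem.Chars.findFrom cs sub (k:Int) none :=
    le_trans (by exact_mod_cast Nat.zero_le k) hs.1
  have hm1 : ¬ ((PySem.Chars.findFrom cs sub (k:Int) none).toNat < i) := by
    intro hlt
    have hk2 : k ≤ (PySem.Chars.findFrom cs sub (k:Int) none).toNat := by
      have := hs.1; omega
    exact hmin _ hk2 hlt hs.2.1
  have hm2 : ¬ (i < (PySem.Chars.findFrom cs sub (k:Int) none).toNat) := by
    intro hlt; exact hs.2.2 i hki hlt hP
  omega

lemma ff_shift_none (cs sub : List Char) (k k' : Nat) (hkk : k ≤ k') (hk' : k' ≤ cs.length)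
    (h : PySem.Chars.findFrom cs sub (k : Int) none = -1) :
    PySem.Chars.findFrom cs sub (k' : Int) none = -1 := by
  rw [PySem.Chars.findFrom_natCast_eq_neg_one_iff cs sub k (le_trans hkk hk'), infix_drop_iff] at h
  apply ffNone' cs sub k' hk'
  intro m hm hp
  exact h ⟨m, by omega, hp⟩

lemma ff_step (cs sub : List Char) (i : Nat) (hi : i + 1 ≤ cs.length)
    (h : ¬ sub <+: cs.drop i) :
    PySem.Chars.findFrom cs sub (i : Int) none
      = PySem.Chars.findFrom cs sub ((i+1 : Nat) : Int) none := by
  by_cases hv : PySem.Chars.findFrom cs sub ((i+1 : Nat) : Int) none = -1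
  · rw [hv]
    have hv' := hv
    rw [PySem.Chars.findFrom_natCast_eq_neg_one_iff cs sub (i+1) hi, infix_drop_iff] at hv'
    apply ffNone' cs sub i (by omega)
    intro m hm hp
    rcases Nat.eq_or_lt_of_le hm with rfl | hlt
    · exact h hp
    · exact hv' ⟨m, by omega, hp⟩
  · have hs := PySem.Chars.findFrom_natCast_spec cs sub (i+1) hi hv
    have h0 : (0:Int) ≤ PySem.Chars.findFrom cs sub ((i+1:Nat):Int) none :=
      le_trans (by exact_mod_cast Nat.zero_le (i+1)) hs.1
    have he : PySem.Chars.findFrom cs sub (i : Int) none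
        = ((PySem.Chars.findFrom cs sub ((i+1:Nat):Int) none).toNat : Int) := by
      apply ffEq' cs sub i _ (by omega) (by have := hs.1; omega) hs.2.1
      intro j hij hjlt
      rcases Nat.eq_or_lt_of_le hij with rfl | hlt
      · exact h
      · exact hs.2.2 j (by omega) hjlt
    rw [he]; omega

lemma pseg_to_end (cs : List Char) (a : Nat) :
    pseg cs a cs.length = String.ofList (cs.drop a) := by
  unfold pseg
  rw [PySem.List.slice_natCast]
  congr 1
  exact List.take_of_length_le (by simp)

lemma tokenEnd_quote (cs : List Char) (i : Nat) (q : Char) (hq : cs[i]? = some q)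
    (h1 : q ≠ '/') : tokenEnd cs i = strEnd cs q cs.length (i+1) := by
  unfold tokenEnd
  rw [if_neg (by rw [hq]; rintro ⟨hc, -⟩; exact h1 (Option.some.inj hc)),
      if_neg (by rw [hq]; rintro ⟨hc, -⟩; exact h1 (Option.some.inj hc))]
  congr 1
  simp [List.getD_eq_getElem?_getD, hq]

lemma tokAt_lt (cs : List Char) (j : Nat) (h : TokAt cs j) : j < cs.length := by
  rcases h with ⟨h, -⟩ | ⟨h, -⟩ | h | h <;> exact (List.getElem?_eq_some_iff.1 h).1

lemma tokAt_of_sub (cs sub : List Char) (m : Nat)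
    (hsub : sub = ['/','*'] ∨ sub = ['/','/'] ∨ sub = ['"'] ∨ sub = ['\''])
    (hp : sub <+: cs.drop m) : TokAt cs m := by
  rcases hsub with rfl | rfl | rfl | rfl
  · exact Or.inl ((pref_at_two cs _ _ m).1 hp)
  · exact Or.inr (Or.inl ((pref_at_two cs _ _ m).1 hp))
  · exact Or.inr (Or.inr (Or.inl ((pref_at_one cs _ m).1 hp)))
  · exact Or.inr (Or.inr (Or.inr ((pref_at_one cs _ m).1 hp)))

lemma bStarts_none (cs : List Char) (last : Nat) (hl : last ≤ cs.length)
    (H : ∀ j, last ≤ j → ¬ TokAt cs j) :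
    (bStarts cs last).min? = none := by
  have hf : ∀ sub : List Char,
      (sub = ['/','*'] ∨ sub = ['/','/'] ∨ sub = ['"'] ∨ sub = ['\'']) →
      PySem.Chars.findFrom cs sub (last : Int) none = -1 := by
    intro sub hsub
    apply ffNone' cs sub last hl
    intro m hm hp
    exact H m hm (tokAt_of_sub cs sub m hsub hp)
  have h1 := hf ['/','*'] (by simp)
  have h2 := hf ['/','/'] (by simp)
  have h3 := hf ['"'] (by simp)
  have h4 := hf ['\''] (by simp)
  simp [bStarts, h1, h2, h3, h4]

lemma bStarts_min_eq (cs : List Char) (last i : Nat) (hl : last ≤ i) (hi : i < cs.length)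
    (H : ∀ j, last ≤ j → j < i → ¬ TokAt cs j) (hT : TokAt cs i) :
    (bStarts cs last).min? = some i := by
  rw [List.min?_eq_some_iff]
  constructor
  · have key : ∀ sub : List Char,
        (sub = ['/','*'] ∨ sub = ['/','/'] ∨ sub = ['"'] ∨ sub = ['\'']) →
        sub <+: cs.drop i →
        PySem.Chars.findFrom cs sub (last : Int) none = (i : Int) := by
      intro sub hsub hp
      apply ffEq' cs sub last i (by omega) hl hp
      intro j hj hjlt hpj
      exact H j hj hjlt (tokAt_of_sub cs sub j hsub hpj)
    have hmem : ∀ f : Int, f = (i : Int) →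
        f ∈ [PySem.Chars.findFrom cs ['/','*'] (last : Int) none,
             PySem.Chars.findFrom cs ['/','/'] (last : Int) none,
             PySem.Chars.findFrom cs ['"'] (last : Int) none,
             PySem.Chars.findFrom cs ['\''] (last : Int) none] →
        i ∈ bStarts cs last := by
      intro f hfi hfm
      refine List.mem_map.2 ⟨f, List.mem_filter.2 ⟨hfm, by simp [hfi]⟩, by simp [hfi]⟩
    rcases hT with ⟨ha, hb⟩ | ⟨ha, hb⟩ | ha | ha
    · exact hmem (PySem.Chars.findFrom cs ['/','*'] (last : Int) none)
        (key ['/','*'] (by simp) ((pref_at_two cs _ _ i).2 ⟨ha, hb⟩)) (by simp)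
    · exact hmem (PySem.Chars.findFrom cs ['/','/'] (last : Int) none)
        (key ['/','/'] (by simp) ((pref_at_two cs _ _ i).2 ⟨ha, hb⟩)) (by simp)
    · exact hmem (PySem.Chars.findFrom cs ['"'] (last : Int) none)
        (key ['"'] (by simp) ((pref_at_one cs _ i).2 ha)) (by simp)
    · exact hmem (PySem.Chars.findFrom cs ['\''] (last : Int) none)
        (key ['\''] (by simp) ((pref_at_one cs _ i).2 ha)) (by simp)
  · intro x hx
    simp only [bStarts, List.mem_map, List.mem_filter] at hx
    rcases hx with ⟨f, ⟨hf, hne⟩, rfl⟩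
    have hne' : f ≠ -1 := by simpa using hne
    simp only [List.mem_cons, List.not_mem_nil, or_false] at hf
    have htok : last ≤ f.toNat ∧ TokAt cs f.toNat := by
      rcases hf with rfl | rfl | rfl | rfl
      all_goals {
        first
        | (have hs := PySem.Chars.findFrom_natCast_spec cs ['/','*'] last (by omega) hne'
           refine ⟨by have := hs.1; omega, tokAt_of_sub cs _ _ (by simp) hs.2.1⟩)
        | (have hs := PySem.Chars.findFrom_natCast_spec cs ['/','/'] last (by omega) hne'
           refine ⟨by have := hs.1; omega, tokAt_of_sub cs _ _ (by simp) hs.2.1⟩)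
        | (have hs := PySem.Chars.findFrom_natCast_spec cs ['"'] last (by omega) hne'
           refine ⟨by have := hs.1; omega, tokAt_of_sub cs _ _ (by simp) hs.2.1⟩)
        | (have hs := PySem.Chars.findFrom_natCast_spec cs ['\''] last (by omega) hne'
           refine ⟨by have := hs.1; omega, tokAt_of_sub cs _ _ (by simp) hs.2.1⟩) }
    by_contra hx
    exact H f.toNat htok.1 (by omega) htok.2

lemma statesEnd (cs : List Char) (fuel i last : Nat) (segs : List (Bool × String))
    (hi : i ≤ cs.length) (hl : last ≤ i) (hn : cs.length ≤ i) :
    ( ((∀ j, last ≤ j → j < i → ¬ TokAt cs j) →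
        aLoop cs fuel segs i last false false false false = segs ++ bLoop cs cs.length last)
    ∧ (cs[last]? = some '/' → cs[last+1]? = some '*' → last + 2 ≤ i →
        (∀ j, last+2 ≤ j → j < i → ¬ (cs[j]? = some '*' ∧ cs[j+1]? = some '/')) →
        aLoop cs fuel segs i last true false false false
          = segs ++ (false, pseg cs last (tokenEnd cs last)) :: bLoop cs cs.length (tokenEnd cs last))
    ∧ (cs[last]? = some '/' → cs[last+1]? = some '/' → last + 2 ≤ i →
        (∀ j, last+2 ≤ j → j < i → cs[j]? ≠ some '\n') →
        aLoop cs fuel segs i last false true false false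
          = segs ++ (false, pseg cs last (tokenEnd cs last)) :: bLoop cs cs.length (tokenEnd cs last))
    ∧ (cs[last]? = some '"' → last + 1 ≤ i →
        aLoop cs fuel segs i last false false true false
          = segs ++ (false, pseg cs last (strEnd cs '"' cs.length i))
              :: bLoop cs cs.length (strEnd cs '"' cs.length i))
    ∧ (cs[last]? = some '\'' → last + 1 ≤ i →
        aLoop cs fuel segs i last false false false true
          = segs ++ (false, pseg cs last (strEnd cs '\'' cs.length i))
              :: bLoop cs cs.length (strEnd cs '\'' cs.length i)) ) := by
  have hieq : i = cs.length := le_antisymm hi hn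
  subst hieq
  refine ⟨?_, ?_, ?_, ?_, ?_⟩
  · intro H
    rw [aLoop_over cs fuel segs _ last _ _ _ _ (le_refl _)]
    by_cases hlast : last < cs.length
    · rw [bLoop_none_eq cs last hlast
        (bStarts_none cs last (by omega) (fun j hj hT => by
          have := tokAt_lt cs j hT
          exact H j hj (by omega) hT))]
      simp [if_pos hlast]
    · rw [bLoop_over cs _ last (by omega), if_neg hlast]
  · intro h1 h2 h3 H
    have hlast : last < cs.length := (List.getElem?_eq_some_iff.1 h1).1
    have hlast1 : last + 1 < cs.length := (List.getElem?_eq_some_iff.1 h2).1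
    have hTE : tokenEnd cs last = cs.length := by
      unfold tokenEnd
      rw [if_pos ⟨h1, h2⟩, if_pos]
      apply ffNone' cs _ (last+2) (by omega)
      intro m hm hp
      rw [pref_at_two] at hp
      have hmlt : m < cs.length := (List.getElem?_eq_some_iff.1 hp.1).1
      exact H m hm hmlt hp
    rw [aLoop_over cs fuel segs _ last _ _ _ _ (le_refl _), if_pos hlast, hTE, pseg_to_end,
        bLoop_over cs _ _ (le_refl _), PySem.List.slice_from_natCast]
    simp
  · intro h1 h2 h3 H
    have hlast : last < cs.length := (List.getElem?_eq_some_iff.1 h1).1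
    have hlast1 : last + 1 < cs.length := (List.getElem?_eq_some_iff.1 h2).1
    have hTE : tokenEnd cs last = cs.length := by
      unfold tokenEnd
      rw [if_neg (by rw [h2]; rintro ⟨-, hx⟩; cases Option.some.inj hx), if_pos ⟨h1, h2⟩, if_pos]
      apply ffNone' cs _ (last+2) (by omega)
      intro m hm hp
      rw [pref_at_one] at hp
      have hmlt : m < cs.length := (List.getElem?_eq_some_iff.1 hp).1
      exact H m hm hmlt hp
    rw [aLoop_over cs fuel segs _ last _ _ _ _ (le_refl _), if_pos hlast, hTE, pseg_to_end,
        bLoop_over cs _ _ (le_refl _), PySem.List.slice_from_natCast]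
    simp
  · intro h1 h2
    have hlast : last < cs.length := (List.getElem?_eq_some_iff.1 h1).1
    rw [aLoop_over cs fuel segs _ last _ _ _ _ (le_refl _), if_pos hlast,
        strEnd_over cs _ _ _ (le_refl _), pseg_to_end, bLoop_over cs _ _ (le_refl _),
        PySem.List.slice_from_natCast]
    simp
  · intro h1 h2
    have hlast : last < cs.length := (List.getElem?_eq_some_iff.1 h1).1
    rw [aLoop_over cs fuel segs _ last _ _ _ _ (le_refl _), if_pos hlast,
        strEnd_over cs _ _ _ (le_refl _), pseg_to_end, bLoop_over cs _ _ (le_refl _),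
        PySem.List.slice_from_natCast]
    simp

lemma strEnd_step (cs : List Char) (q : Char) (i : Nat) (hin : i < cs.length)
    (hq : cs[i] ≠ q) (hbs : cs[i] ≠ '\\') :
    strEnd cs q cs.length i = strEnd cs q cs.length (i+1) := by
  have hgi : cs[i]? = some cs[i] := List.getElem?_eq_getElem hin
  by_cases h1n : i + 1 < cs.length
  · have hstepq : PySem.Chars.findFrom cs [q] (i : Int) none
        = PySem.Chars.findFrom cs [q] ((i+1 : Nat) : Int) none := by
      apply ff_step cs [q] i (by omega)
      rw [pref_at_one, hgi]
      intro h; exact hq (Option.some.inj h)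
    have hstepb : PySem.Chars.findFrom cs ['\\'] (i : Int) none
        = PySem.Chars.findFrom cs ['\\'] ((i+1 : Nat) : Int) none := by
      apply ff_step cs ['\\'] i (by omega)
      rw [pref_at_one, hgi]
      intro h; exact hbs (Option.some.inj h)
    rw [strEnd_unfoldN cs q i hin, hstepq, hstepb]
    conv_rhs => rw [strEnd_unfoldN cs q (i+1) h1n]
  · have hnone : PySem.Chars.findFrom cs [q] (i : Int) none = -1 := by
      apply ffNone' cs [q] i (by omega)
      intro m hm hp
      rw [pref_at_one] at hp
      have hmlt := (List.getElem?_eq_some_iff.1 hp).1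
      have hmi : m = i := by omega
      subst hmi
      rw [hgi] at hp
      exact hq (Option.some.inj hp)
    rw [strEnd_over cs q _ (i+1) (by omega), strEnd_unfoldN cs q i hin, if_pos hnone]

theorem states (cs : List Char) :
    ∀ (fuel i last : Nat) (segs : List (Bool × String)),
    i ≤ cs.length → last ≤ i → cs.length - i ≤ fuel →
    ( ((∀ j, last ≤ j → j < i → ¬ TokAt cs j) →
        aLoop cs fuel segs i last false false false false = segs ++ bLoop cs cs.length last)
    ∧ (cs[last]? = some '/' → cs[last+1]? = some '*' → last + 2 ≤ i →
        (∀ j, last+2 ≤ j → j < i → ¬ (cs[j]? = some '*' ∧ cs[j+1]? = some '/')) →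
        aLoop cs fuel segs i last true false false false
          = segs ++ (false, pseg cs last (tokenEnd cs last)) :: bLoop cs cs.length (tokenEnd cs last))
    ∧ (cs[last]? = some '/' → cs[last+1]? = some '/' → last + 2 ≤ i →
        (∀ j, last+2 ≤ j → j < i → cs[j]? ≠ some '\n') →
        aLoop cs fuel segs i last false true false false
          = segs ++ (false, pseg cs last (tokenEnd cs last)) :: bLoop cs cs.length (tokenEnd cs last))
    ∧ (cs[last]? = some '"' → last + 1 ≤ i →
        aLoop cs fuel segs i last false false true false
          = segs ++ (false, pseg cs last (strEnd cs '"' cs.length i))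
              :: bLoop cs cs.length (strEnd cs '"' cs.length i))
    ∧ (cs[last]? = some '\'' → last + 1 ≤ i →
        aLoop cs fuel segs i last false false false true
          = segs ++ (false, pseg cs last (strEnd cs '\'' cs.length i))
              :: bLoop cs cs.length (strEnd cs '\'' cs.length i)) ) := by
  intro fuel
  induction fuel with
  | zero =>
    intro i last segs hi hl hf
    exact statesEnd cs 0 i last segs hi hl (by omega)
  | succ f ih =>
    intro i last segs hi hl hf
    by_cases hin : i < cs.length
    case neg => exact statesEnd cs (f+1) i last segs hi hl (by omega)
    case pos =>
    have hgi : cs[i]? = some cs[i] := List.getElem?_eq_getElem hin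
    refine ⟨?_, ?_, ?_, ?_, ?_⟩
    · -- NEUTRAL
      intro H
      by_cases hT : TokAt cs i
      · have hmin := bStarts_min_eq cs last i hl hin H hT
        rw [bLoop_some_eq cs last i (by omega) hmin]
        rw [aLoop, if_pos hin]
        simp only [Bool.false_eq_true, if_false]
        rcases hT with ⟨ha, hb⟩ | ⟨ha, hb⟩ | ha | ha
        · -- /*
          rw [if_pos ⟨ha, hb⟩]
          have hi2 : i + 2 ≤ cs.length := by
            have := (List.getElem?_eq_some_iff.1 hb).1; omega
          have hblk := (ih (i+2) i (segs ++ if last < i then [(true, pseg cs last i)] else [])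
            hi2 (by omega) (by omega)).2.1
          rw [hblk ha hb (le_refl _) (by intro j a b; omega)]
          simp [List.append_assoc]
        · -- //
          rw [if_neg (by rintro ⟨-, hx⟩; rw [hb] at hx; cases hx), if_pos ⟨ha, hb⟩]
          have hi2 : i + 2 ≤ cs.length := by
            have := (List.getElem?_eq_some_iff.1 hb).1; omega
          have hln := (ih (i+2) i (segs ++ if last < i then [(true, pseg cs last i)] else [])
            hi2 (by omega) (by omega)).2.2.1
          rw [hln ha hb (le_refl _) (by intro j a b; omega)]
          simp [List.append_assoc]
        · -- "
          rw [if_neg (by rintro ⟨hx, -⟩; rw [ha] at hx; cases Option.some.inj hx),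
              if_neg (by rintro ⟨hx, -⟩; rw [ha] at hx; cases Option.some.inj hx), if_pos ha]
          have hstr := (ih (i+1) i (segs ++ if last < i then [(true, pseg cs last i)] else [])
            (by omega) (by omega) (by omega)).2.2.2.1
          rw [hstr ha (le_refl _), tokenEnd_quote cs i '"' ha (by decide)]
          simp [List.append_assoc]
        · -- '
          rw [if_neg (by rintro ⟨hx, -⟩; rw [ha] at hx; cases Option.some.inj hx),
              if_neg (by rintro ⟨hx, -⟩; rw [ha] at hx; cases Option.some.inj hx),
              if_neg (by intro hx; rw [ha] at hx; cases Option.some.inj hx), if_pos ha]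
          have hch := (ih (i+1) i (segs ++ if last < i then [(true, pseg cs last i)] else [])
            (by omega) (by omega) (by omega)).2.2.2.2
          rw [hch ha (le_refl _), tokenEnd_quote cs i '\'' ha (by decide)]
          simp [List.append_assoc]
      · -- no token at i
        have c1 : ¬ (cs[i]? = some '/' ∧ cs[i+1]? = some '*') := fun hx => hT (Or.inl hx)
        have c2 : ¬ (cs[i]? = some '/' ∧ cs[i+1]? = some '/') := fun hx => hT (Or.inr (Or.inl hx))
        have c3 : ¬ (cs[i]? = some '"') := fun hx => hT (Or.inr (Or.inr (Or.inl hx)))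
        have c4 : ¬ (cs[i]? = some '\'') := fun hx => hT (Or.inr (Or.inr (Or.inr hx)))
        rw [aLoop, if_pos hin]
        simp only [Bool.false_eq_true, if_false]
        rw [if_neg c1, if_neg c2, if_neg c3, if_neg c4]
        apply (ih (i+1) last segs (by omega) (by omega) (by omega)).1
        intro j hj hjlt
        by_cases hji : j = i
        · subst hji; exact hT
        · exact H j hj (by omega)
    · -- BLOCK
      intro h1 h2 h3 H
      have hlast1 : last + 1 < cs.length := (List.getElem?_eq_some_iff.1 h2).1
      rw [aLoop, if_pos hin]
      simp only [if_true]
      by_cases hcl : cs[i]? = some '*' ∧ cs[i+1]? = some '/'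
      · rw [if_pos hcl]
        have hi1 : i + 1 < cs.length := (List.getElem?_eq_some_iff.1 hcl.2).1
        have hTE : tokenEnd cs last = i + 2 := by
          unfold tokenEnd
          rw [if_pos ⟨h1, h2⟩]
          have hfind : PySem.Chars.findFrom cs ['*','/'] ((last+2 : Nat) : Int) none = (i : Int) := by
            apply ffEq' cs _ (last+2) i (by omega) h3
            · exact (pref_at_two cs _ _ i).2 hcl
            · intro j hj hjlt hp
              rw [pref_at_two] at hp
              exact H j hj hjlt hp
          rw [hfind, if_neg (by omega)]
          omega
        rw [hTE]
        have hneu := (ih (i+2) (i+2) (segs ++ [(false, pseg cs last (i+2))])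
          (by omega) (le_refl _) (by omega)).1
        rw [hneu (by intro j a b; omega)]
        simp
      · rw [if_neg hcl]
        apply (ih (i+1) last segs (by omega) (by omega) (by omega)).2.1 h1 h2 (by omega)
        intro j hj hjlt
        by_cases hji : j = i
        · subst hji; exact hcl
        · exact H j hj (by omega)
    · -- LINE
      intro h1 h2 h3 H
      have hlast1 : last + 1 < cs.length := (List.getElem?_eq_some_iff.1 h2).1
      rw [aLoop, if_pos hin]
      simp only [Bool.false_eq_true, if_false, if_true]
      by_cases hcl : cs[i]? = some '\n'
      · rw [if_pos hcl]
        have hTE : tokenEnd cs last = i + 1 := by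
          unfold tokenEnd
          rw [if_neg (by rw [h2]; rintro ⟨-, hx⟩; cases Option.some.inj hx), if_pos ⟨h1, h2⟩]
          have hfind : PySem.Chars.findFrom cs ['\n'] ((last+2 : Nat) : Int) none = (i : Int) := by
            apply ffEq' cs _ (last+2) i (by omega) h3
            · exact (pref_at_one cs _ i).2 hcl
            · intro j hj hjlt hp
              rw [pref_at_one] at hp
              exact H j hj hjlt hp
          rw [hfind, if_neg (by omega)]
          omega
        rw [hTE]
        have hneu := (ih (i+1) (i+1) (segs ++ [(false, pseg cs last (i+1))])
          (by omega) (le_refl _) (by omega)).1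
        rw [hneu (by intro j a b; omega)]
        simp
      · rw [if_neg hcl]
        apply (ih (i+1) last segs (by omega) (by omega) (by omega)).2.2.1 h1 h2 (by omega)
        intro j hj hjlt
        by_cases hji : j = i
        · subst hji; exact hcl
        · exact H j hj (by omega)
    · -- STRING
      intro h1 h2
      have hlast : last < cs.length := by
        have := (List.getElem?_eq_some_iff.1 h1).1; omega
      rw [aLoop, if_pos hin]
      simp only [Bool.false_eq_true, if_false, if_true]
      by_cases hbs : cs[i]? = some '\\'
      · rw [if_pos hbs]
        by_cases hcq : PySem.Chars.findFrom cs ['"'] (i : Int) none = -1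
        · have hse : strEnd cs '"' cs.length i = cs.length := by
            rw [strEnd_unfoldN cs '"' i hin, if_pos hcq]
          by_cases h2n : i + 2 ≤ cs.length
          · have hstr := (ih (i+2) last segs h2n (by omega) (by omega)).2.2.2.1
            rw [hstr h1 (by omega)]
            have hse2 : strEnd cs '"' cs.length (i+2) = cs.length := by
              by_cases hx : i + 2 < cs.length
              · rw [strEnd_unfoldN cs '"' (i+2) hx,
                    if_pos (ff_shift_none cs _ i (i+2) (by omega) (by omega) hcq)]
              · exact strEnd_over _ _ _ _ (by omega)
            rw [hse2, hse]
          · rw [aLoop_over cs f segs (i+2) last _ _ _ _ (by omega), if_pos hlast, hse,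
                pseg_to_end, bLoop_over cs _ _ (le_refl _), PySem.List.slice_from_natCast]
            simp
        · have hs := PySem.Chars.findFrom_natCast_spec cs ['"'] i (by omega) hcq
          have hci : cs[(PySem.Chars.findFrom cs ['"'] (i : Int) none).toNat]? = some '"' :=
            (pref_at_one _ _ _).1 hs.2.1
          have hcne : (PySem.Chars.findFrom cs ['"'] (i : Int) none).toNat ≠ i := by
            intro he
            rw [he, hbs] at hci
            cases Option.some.inj hci
          have hclen : (PySem.Chars.findFrom cs ['"'] (i : Int) none).toNat < cs.length :=
            (List.getElem?_eq_some_iff.1 hci).1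
          have h2n : i + 2 ≤ cs.length := by have := hs.1; omega
          have hbf : PySem.Chars.findFrom cs ['\\'] (i : Int) none = (i : Int) := by
            apply ffEq' cs _ i i (by omega) (le_refl _)
            · exact (pref_at_one cs _ i).2 hbs
            · intro j a b; omega
          have hse : strEnd cs '"' cs.length i = strEnd cs '"' cs.length (i+2) := by
            rw [strEnd_unfoldN cs '"' i hin, if_neg hcq, if_pos ⟨by rw [hbf]; omega,
              by rw [hbf]; have := hs.1; omega⟩]
            congr 1
            rw [hbf]
            omega
          rw [hse]
          exact (ih (i+2) last segs h2n (by omega) (by omega)).2.2.2.1 h1 (by omega)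
      · by_cases hcq2 : cs[i]? = some '"'
        · have hcf : PySem.Chars.findFrom cs ['"'] (i : Int) none = (i : Int) := by
            apply ffEq' cs _ i i (by omega) (le_refl _)
            · exact (pref_at_one cs _ i).2 hcq2
            · intro j a b; omega
          have hse : strEnd cs '"' cs.length i = i + 1 := by
            rw [strEnd_unfoldN cs '"' i hin, if_neg (by rw [hcf]; omega), if_neg ?hb]
            case hb =>
              rintro ⟨hbne, hblt⟩
              have hsb := PySem.Chars.findFrom_natCast_spec cs ['\\'] i (by omega) hbne
              have hbi : cs[(PySem.Chars.findFrom cs ['\\'] (i : Int) none).toNat]? = some '\\' :=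
                (pref_at_one _ _ _).1 hsb.2.1
              have hne2 : (PySem.Chars.findFrom cs ['\\'] (i : Int) none).toNat ≠ i := by
                intro he
                rw [he, hcq2] at hbi
                cases Option.some.inj hbi
              rw [hcf] at hblt
              have := hsb.1
              omega
            rw [hcf]
            omega
          rw [if_neg hbs, if_pos hcq2, hse]
          have hneu := (ih (i+1) (i+1) (segs ++ [(false, pseg cs last (i+1))])
            (by omega) (le_refl _) (by omega)).1
          rw [hneu (by intro j a b; omega)]
          simp
        · rw [if_neg hbs, if_neg hcq2, strEnd_step cs '"' i hin
            (by intro hx; rw [← hx] at hcq2; exact hcq2 hgi)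
            (by intro hx; rw [← hx] at hbs; exact hbs hgi)]
          exact (ih (i+1) last segs (by omega) (by omega) (by omega)).2.2.2.1 h1 (by omega)
    · -- CHAR
      intro h1 h2
      have hlast : last < cs.length := by
        have := (List.getElem?_eq_some_iff.1 h1).1; omega
      rw [aLoop, if_pos hin]
      simp only [Bool.false_eq_true, if_false, if_true]
      by_cases hbs : cs[i]? = some '\\'
      · rw [if_pos hbs]
        by_cases hcq : PySem.Chars.findFrom cs ['\''] (i : Int) none = -1
        · have hse : strEnd cs '\'' cs.length i = cs.length := by
            rw [strEnd_unfoldN cs '\'' i hin, if_pos hcq]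
          by_cases h2n : i + 2 ≤ cs.length
          · have hstr := (ih (i+2) last segs h2n (by omega) (by omega)).2.2.2.2
            rw [hstr h1 (by omega)]
            have hse2 : strEnd cs '\'' cs.length (i+2) = cs.length := by
              by_cases hx : i + 2 < cs.length
              · rw [strEnd_unfoldN cs '\'' (i+2) hx,
                    if_pos (ff_shift_none cs _ i (i+2) (by omega) (by omega) hcq)]
              · exact strEnd_over _ _ _ _ (by omega)
            rw [hse2, hse]
          · rw [aLoop_over cs f segs (i+2) last _ _ _ _ (by omega), if_pos hlast, hse,
                pseg_to_end, bLoop_over cs _ _ (le_refl _), PySem.List.slice_from_natCast]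
            simp
        · have hs := PySem.Chars.findFrom_natCast_spec cs ['\''] i (by omega) hcq
          have hci : cs[(PySem.Chars.findFrom cs ['\''] (i : Int) none).toNat]? = some '\'' :=
            (pref_at_one _ _ _).1 hs.2.1
          have hcne : (PySem.Chars.findFrom cs ['\''] (i : Int) none).toNat ≠ i := by
            intro he
            rw [he, hbs] at hci
            cases Option.some.inj hci
          have hclen : (PySem.Chars.findFrom cs ['\''] (i : Int) none).toNat < cs.length :=
            (List.getElem?_eq_some_iff.1 hci).1
          have h2n : i + 2 ≤ cs.length := by have := hs.1; omega
          have hbf : PySem.Chars.findFrom cs ['\\'] (i : Int) none = (i : Int) := by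
            apply ffEq' cs _ i i (by omega) (le_refl _)
            · exact (pref_at_one cs _ i).2 hbs
            · intro j a b; omega
          have hse : strEnd cs '\'' cs.length i = strEnd cs '\'' cs.length (i+2) := by
            rw [strEnd_unfoldN cs '\'' i hin, if_neg hcq, if_pos ⟨by rw [hbf]; omega,
              by rw [hbf]; have := hs.1; omega⟩]
            congr 1
            rw [hbf]
            omega
          rw [hse]
          exact (ih (i+2) last segs h2n (by omega) (by omega)).2.2.2.2 h1 (by omega)
      · by_cases hcq2 : cs[i]? = some '\''
        · have hcf : PySem.Chars.findFrom cs ['\''] (i : Int) none = (i : Int) := by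
            apply ffEq' cs _ i i (by omega) (le_refl _)
            · exact (pref_at_one cs _ i).2 hcq2
            · intro j a b; omega
          have hse : strEnd cs '\'' cs.length i = i + 1 := by
            rw [strEnd_unfoldN cs '\'' i hin, if_neg (by rw [hcf]; omega), if_neg ?hb]
            case hb =>
              rintro ⟨hbne, hblt⟩
              have hsb := PySem.Chars.findFrom_natCast_spec cs ['\\'] i (by omega) hbne
              have hbi : cs[(PySem.Chars.findFrom cs ['\\'] (i : Int) none).toNat]? = some '\\' :=
                (pref_at_one _ _ _).1 hsb.2.1
              have hne2 : (PySem.Chars.findFrom cs ['\\'] (i : Int) none).toNat ≠ i := by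
                intro he
                rw [he, hcq2] at hbi
                cases Option.some.inj hbi
              rw [hcf] at hblt
              have := hsb.1
              omega
            rw [hcf]
            omega
          rw [if_neg hbs, if_pos hcq2, hse]
          have hneu := (ih (i+1) (i+1) (segs ++ [(false, pseg cs last (i+1))])
            (by omega) (le_refl _) (by omega)).1
          rw [hneu (by intro j a b; omega)]
          simp
        · rw [if_neg hbs, if_neg hcq2, strEnd_step cs '\'' i hin
            (by intro hx; rw [← hx] at hcq2; exact hcq2 hgi)
            (by intro hx; rw [← hx] at hbs; exact hbs hgi)]
          exact (ih (i+1) last segs (by omega) (by omega) (by omega)).2.2.2.2 h1 (by omega)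

-- ===== VERDICT (by name: the statement is the Claim_ definition above) =====
theorem split_code_segments_py_spec : Claim_equal_split_code_segments_py := by
  intro code _
  unfold Spec_split_code_segments_py split_code_segments_py split_code_segments_py_alt
  have h := (states code.toList code.toList.length 0 0 [] (by omega) (by omega) (by omega)).1
  simpa using h (by omega)
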